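-- pv_equiv track=rewrite | github.com/eun0571/synchronizer | 백준/Gold/2573. 빙산/빙산.py | melt_iceberg
-- ===== SOURCE A (Python) =====
-- dx = [-1, 1, 0, 0]
--
-- dy = [0, 0, -1, 1]
--
-- def melt_iceberg(iceberg):
--     n = len(iceberg)
--     m = len(iceberg[0])
--     new_iceberg = [[0] * m for _ in range(n)]
--
--     for i in range(n):
--         for j in range(m):
--             if iceberg[i][j] > 0:
--                 water_count = 0
--                 for k in range(4):
--                     ni = i + dx[k]
--                     nj = j + dy[k]
--                     if 0 <= ni < n and 0 <= nj < m and iceberg[ni][nj] == 0: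
--                         water_count += 1
--                 new_iceberg[i][j] = max(0, iceberg[i][j] - water_count)
--
--     return new_iceberg
-- ===== SOURCE B (Python) =====
-- def melt_iceberg(iceberg):
--     n = len(iceberg)
--     m = len(iceberg[0])
--     # scatter: each water cell pushes one unit of melt to its in-bounds neighbors
--     melt = [[0] * m for _ in range(n)]
--     for i in range(n):
--         for j in range(m):
--             if iceberg[i][j] == 0:
--                 for a, b in ((i - 1, j), (i + 1, j), (i, j - 1), (i, j + 1)):
--                     if 0 <= a < n and 0 <= b < m:
--                         melt[a][b] += 1
--     return [[max(0, iceberg[i][j] - melt[i][j]) if iceberg[i][j] > 0 else 0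
--              for j in range(m)] for i in range(n)]
-- ===== Notes on version B (the rewrite author's own statement) =====
-- stated objective: alternative
-- what changed: A gathers: for each positive ice cell it scans its four neighbours with bounds checks to count adjacent water; B scatters: it builds a separate zero-initialised melt grid by letting every water cell push one melt unit to each in-bounds neighbour, then forms the result as max(0, ice - melt) per positive cell.
import Mathlib
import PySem

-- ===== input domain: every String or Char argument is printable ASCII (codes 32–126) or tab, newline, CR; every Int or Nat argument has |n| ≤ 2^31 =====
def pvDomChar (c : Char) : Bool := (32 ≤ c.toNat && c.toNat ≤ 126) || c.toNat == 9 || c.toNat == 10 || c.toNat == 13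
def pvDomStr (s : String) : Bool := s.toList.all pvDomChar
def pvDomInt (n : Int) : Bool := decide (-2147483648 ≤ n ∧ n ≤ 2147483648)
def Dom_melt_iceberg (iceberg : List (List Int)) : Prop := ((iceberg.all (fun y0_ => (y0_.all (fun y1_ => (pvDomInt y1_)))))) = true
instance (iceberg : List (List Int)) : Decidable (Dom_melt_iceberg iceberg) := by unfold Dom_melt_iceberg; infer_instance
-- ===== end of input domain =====

-- B replaces A's per-ice-cell gather (4-direction bounds-checked neighbour scan) by a
-- scatter pass: every water cell pushes one melt unit onto a separate zero-initialised
-- melt grid at its in-bounds neighbours, and the result is built from ice minus melt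
-- (objective: alternative decomposition, same O(n·m) cost).

-- shared grid read: g[i][j] (indices known in range wherever the proofs use the value)
def gget (g : List (List Int)) (i j : Nat) : Int := (g.getD i []).getD j 0

-- ===== PORT A =====
def pvDx : List Int := [-1, 1, 0, 0]
def pvDy : List Int := [0, 0, -1, 1]

-- A's inner `for k in range(4)` loop computing water_count for cell (i, j)
def waterCount (ice : List (List Int)) (n m : Nat) (i j : Nat) : Int :=
  (List.range 4).foldl (fun wc k =>
    let ni : Int := (i : Int) + pvDx.getD k 0
    let nj : Int := (j : Int) + pvDy.getD k 0
    if 0 ≤ ni ∧ ni < (n : Int) ∧ 0 ≤ nj ∧ nj < (m : Int) ∧ gget ice ni.toNat nj.toNat = 0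
    then wc + 1 else wc) 0

-- `iceberg[0]` raises on the empty list in Python (excluded by Pre_); here headD [].
def melt_iceberg (iceberg : List (List Int)) : List (List Int) :=
  let n := iceberg.length
  let m := (iceberg.headD []).length
  (List.range n).foldl (fun acc i =>
    (List.range m).foldl (fun acc j =>
      if gget iceberg i j > 0 then
        acc.modify i (fun row => row.set j (max 0 (gget iceberg i j - waterCount iceberg n m i j)))
      else acc) acc)
    (List.replicate n (List.replicate m (0 : Int)))

-- ===== PORT B =====
-- melt[a][b] += 1 when (a, b) is in bounds (the `if 0 <= a < n and 0 <= b < m` guard)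
def pvBump (n m : Nat) (g : List (List Int)) (p : Int × Int) : List (List Int) :=
  if 0 ≤ p.1 ∧ p.1 < (n : Int) ∧ 0 ≤ p.2 ∧ p.2 < (m : Int) then
    g.modify p.1.toNat (fun row => row.modify p.2.toNat (· + 1))
  else g

def melt_iceberg_alt (iceberg : List (List Int)) : List (List Int) :=
  let n := iceberg.length
  let m := (iceberg.headD []).length
  let melt := (List.range n).foldl (fun g i =>
    (List.range m).foldl (fun g j =>
      if gget iceberg i j = 0 then
        [((i : Int) - 1, (j : Int)), ((i : Int) + 1, (j : Int)),
         ((i : Int), (j : Int) - 1), ((i : Int), (j : Int) + 1)].foldl (pvBump n m) g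
      else g) g)
    (List.replicate n (List.replicate m (0 : Int)))
  (List.range n).map (fun i => (List.range m).map (fun j =>
    if gget iceberg i j > 0 then max 0 (gget iceberg i j - gget melt i j) else 0))

-- ===== PRECONDITION & SPEC =====
-- Pre_ = exactly the inputs where Python A returns: A raises IndexError on the empty
-- grid (iceberg[0]) and whenever some row is shorter than row 0 (iceberg[i][j], j < m).
def Pre_melt_iceberg (iceberg : List (List Int)) : Prop :=
  iceberg ≠ [] ∧ ∀ row ∈ iceberg, (iceberg.headD []).length ≤ row.length

instance (iceberg : List (List Int)) : Decidable (Pre_melt_iceberg iceberg) := by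
  unfold Pre_melt_iceberg; infer_instance

def pvWitness_melt_iceberg : List (List Int) := [[1, 0], [2, 3]]

def Spec_melt_iceberg (iceberg : List (List Int)) (out : List (List Int)) : Prop :=
  out = melt_iceberg_alt iceberg
instance (iceberg : List (List Int)) (out : List (List Int)) : Decidable (Spec_melt_iceberg iceberg out) := by
  unfold Spec_melt_iceberg; infer_instance

-- ===== CLAIM (what is proved, stated in full; the proofs are below) =====
def Claim_equal_melt_iceberg : Prop := ∀ (iceberg : List (List Int)), Dom_melt_iceberg iceberg → Pre_melt_iceberg iceberg → Spec_melt_iceberg iceberg (melt_iceberg iceberg)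

-- ===== LEMMAS AND PROOFS =====

-- the value A stores at (i, j); 0 where the ice is not positive
def cellA (ice : List (List Int)) (n m : Nat) (i j : Nat) : Int :=
  if gget ice i j > 0 then max 0 (gget ice i j - waterCount ice n m i j) else 0

-- indicator: position (a, b) is in bounds and water
def nbr0 (ice : List (List Int)) (n m : Nat) (a b : Int) : Int :=
  if 0 ≤ a ∧ a < (n : Int) ∧ 0 ≤ b ∧ b < (m : Int) ∧ gget ice a.toNat b.toNat = 0 then 1 else 0

-- getD after modify, when the index is in range
lemma getD_modify {α : Type} (f : α → α) (l : List α) (i t : Nat) (d : α) (ht : t < l.length) :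
    (l.modify i f).getD t d = if i = t then f (l.getD t d) else l.getD t d := by
  obtain ⟨v, hv⟩ : ∃ v, l[t]? = some v := ⟨l[t], List.getElem?_eq_getElem ht⟩
  simp [List.getD_eq_getElem?_getD, List.getElem?_modify, hv]

-- a conditional modify is a modify by a conditional function
lemma ite_modify {α : Type} (c : Prop) [Decidable c] (l : List α) (i : Nat) (f : α → α) :
    (if c then l.modify i f else l) = l.modify i (fun x => if c then f x else x) := by
  by_cases h : c
  · simp [h]
  · simp only [h, if_false]
    exact (List.modify_id i l).symm

-- a conditional set is a modify by a conditional function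
lemma ite_set {α : Type} (c : Prop) [Decidable c] (l : List α) (j : Nat) (v : α) :
    (if c then l.set j v else l) = l.modify j (fun x => if c then v else x) := by
  by_cases h : c
  · simp only [h, if_pos]
    apply List.ext_getElem?
    intro t
    rw [List.getElem?_set, List.getElem?_modify]
    rcases hmem : l[t]? with _ | w
    · split <;> simp_all
    · have : t < l.length := by
        by_contra hc
        rw [List.getElem?_eq_none_iff.2 (by omega)] at hmem; exact absurd hmem (by simp)
      split <;> simp_all
  · simp only [h, if_false]
    exact (List.modify_id j l).symm

lemma waterCount_eq (ice : List (List Int)) (n m i j : Nat) :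
    waterCount ice n m i j =
      nbr0 ice n m ((i : Int) + -1) ((j : Int) + 0) + nbr0 ice n m ((i : Int) + 1) ((j : Int) + 0) +
      nbr0 ice n m ((i : Int) + 0) ((j : Int) + -1) + nbr0 ice n m ((i : Int) + 0) ((j : Int) + 1) := by
  have h4 : List.range 4 = [0, 1, 2, 3] := by decide
  simp only [waterCount, h4, List.foldl, nbr0, pvDx, pvDy, List.getD]
  norm_num
  split_ifs <;> ring

-- generic: a fold over range M whose k-th step modifies index k
lemma foldl_range_modify {α : Type} (f : Nat → α → α) (l0 : List α) (M t : Nat) :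
    ((List.range M).foldl (fun l k => l.modify k (f k)) l0)[t]? =
      if t < M then (l0[t]?).map (f t) else l0[t]? := by
  induction M with
  | zero => simp
  | succ M ih =>
    rw [List.range_succ, List.foldl_append]
    simp only [List.foldl_cons, List.foldl_nil, List.getElem?_modify]
    rcases Nat.lt_trichotomy t M with h | h | h
    · simp [ih, h, Nat.lt_succ_of_lt h, Nat.ne_of_gt h]
    · subst h
      simp [ih]
    · have h1 : ¬ t < M := by omega
      have h2 : ¬ t < M + 1 := by omega
      simp [ih, h1, h2, Nat.ne_of_lt h]

-- a fold whose every step modifies the SAME index i commutes with modify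
lemma foldl_modify_comm {α : Type} (i : Nat) (f : Nat → α → α) (l0 : List α) (js : List Nat) :
    js.foldl (fun l j => l.modify i (f j)) l0 =
      l0.modify i (fun x => js.foldl (fun x j => f j x) x) := by
  induction js generalizing l0 with
  | nil => exact (List.modify_id i l0).symm
  | cons j js ih =>
    simp only [List.foldl_cons, ih]
    apply List.ext_getElem?
    intro t
    simp only [List.getElem?_modify]
    rcases l0[t]? with _ | v
    · rfl
    · show Option.map _ (Option.map _ (some v)) = Option.map _ (some v)
      simp only [Option.map_some, Option.some.injEq]
      split <;> rfl

-- A's result, characterised as a double map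
lemma A_char (ice : List (List Int)) :
    melt_iceberg ice =
      (List.range ice.length).map (fun i =>
        (List.range (ice.headD []).length).map (fun j =>
          cellA ice ice.length (ice.headD []).length i j)) := by
  unfold melt_iceberg
  apply List.ext_getElem?
  intro t
  simp only [ite_modify]
  simp only [foldl_modify_comm]
  rw [foldl_range_modify]
  rw [List.getElem?_map]
  rcases Nat.lt_or_ge t ice.length with ht | ht
  · rw [if_pos ht, List.getElem?_range ht,
      List.getElem?_replicate, if_pos ht]
    simp only [Option.map_some]
    congr 1
    -- the row-level fold equals the row-level map
    apply List.ext_getElem?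
    intro u
    simp only [ite_set]
    rw [foldl_range_modify]
    rw [List.getElem?_map, List.getElem?_replicate]
    rcases Nat.lt_or_ge u (ice.headD []).length with hu | hu
    · rw [if_pos hu, if_pos hu, List.getElem?_range hu]
      simp only [Option.map_some, Option.map_some]
      unfold cellA
      split <;> rfl
    · rw [if_neg (by omega), if_neg (by omega),
        List.getElem?_eq_none_iff.2 (by simpa using hu)]
      rfl
  · rw [if_neg (by omega), List.getElem?_replicate, if_neg (by omega),
      List.getElem?_eq_none_iff.2 (by simpa using ht)]
    rfl

-- shape of a grid: n rows, every row of length m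
def Shaped (g : List (List Int)) (n m : Nat) : Prop :=
  g.length = n ∧ ∀ (t : Nat) (r : List Int), g[t]? = some r → r.length = m

lemma shaped_replicate (n m : Nat) : Shaped (List.replicate n (List.replicate m (0 : Int))) n m := by
  constructor
  · simp
  · intro t r h
    rw [List.getElem?_replicate] at h
    split at h
    · exact (Option.some.inj h) ▸ (by simp)
    · exact absurd h (by simp)

lemma shaped_bump (n m : Nat) (g : List (List Int)) (p : Int × Int) (hg : Shaped g n m) :
    Shaped (pvBump n m g p) n m := by
  unfold pvBump
  split
  · obtain ⟨h1, h2⟩ := hg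
    refine ⟨by simpa using h1, ?_⟩
    intro t r h
    rw [List.getElem?_modify] at h
    rcases hmem : g[t]? with _ | r' <;> rw [hmem] at h
    · simp at h
    · have hlen := h2 t r' hmem
      have h' : (if p.1.toNat = t then r'.modify p.2.toNat (· + 1) else r') = r := by
        simpa using h
      subst h'
      split <;> simp [hlen]
  · exact hg

lemma bump_gget (n m : Nat) (g : List (List Int)) (p : Int × Int) (x y : Nat)
    (hg : Shaped g n m) (hx : x < n) (hy : y < m) :
    gget (pvBump n m g p) x y = gget g x y + (if p = ((x : Int), (y : Int)) then 1 else 0) := by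
  obtain ⟨hlen, hrows⟩ := hg
  have hxg : x < g.length := by omega
  have hrow : (g.getD x []).length = m := by
    have := hrows x (g.getD x []) ?_
    · exact this
    · simp [List.getD_eq_getElem?_getD, List.getElem?_eq_getElem hxg]
  unfold pvBump
  split
  case isTrue hb =>
    obtain ⟨hb1, hb2, hb3, hb4⟩ := hb
    unfold gget
    rw [getD_modify _ _ _ _ _ (by omega)]
    by_cases h1 : p.1.toNat = x
    · rw [if_pos h1, getD_modify _ _ _ _ _ (by omega)]
      by_cases h2 : p.2.toNat = y
      · have hp : p = ((x : Int), (y : Int)) := by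
          have : p.1 = (x : Int) := by omega
          have : p.2 = (y : Int) := by omega
          exact Prod.ext (by omega) (by omega)
        simp [hp]
      · have hp : p ≠ ((x : Int), (y : Int)) := by
          intro hc; rw [hc] at h2; simp at h2
        simp [h2, hp]
    · rw [if_neg h1]
      have hp : p ≠ ((x : Int), (y : Int)) := by
        intro hc; rw [hc] at h1; simp at h1
      simp [hp]
  case isFalse hb =>
    have hp : p ≠ ((x : Int), (y : Int)) := by
      intro hc
      rw [hc] at hb
      push Not at hb
      simp at hb
      omega
    simp [hp]

lemma foldl_bump_count (n m : Nat) (L : List (Int × Int)) (g : List (List Int)) (x y : Nat)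
    (hg : Shaped g n m) (hx : x < n) (hy : y < m) :
    gget (L.foldl (pvBump n m) g) x y = gget g x y + (L.count ((x : Int), (y : Int)) : Int) := by
  induction L generalizing g with
  | nil => simp
  | cons p L ih =>
    rw [List.foldl_cons, ih (pvBump n m g p) (shaped_bump n m g p hg),
        bump_gget n m g p x y hg hx hy, List.count_cons]
    push_cast
    rcases eq_or_ne p ((x : Int), (y : Int)) with h | h
    · simp [h]
      ring
    · simp [h]

lemma foldl_flatMap {α β γ : Type} (f : α → List β) (step : γ → β → γ) (l : List α) (g : γ) :
    (l.flatMap f).foldl step g = l.foldl (fun g x => (f x).foldl step g) g := by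
  induction l generalizing g with
  | nil => rfl
  | cons a l ih => simp only [List.flatMap_cons, List.foldl_append, List.foldl_cons, ih]

lemma count_flatMap {α β : Type} [BEq β] (p : β) (f : α → List β) (l : List α) :
    (l.flatMap f).count p = (l.map (fun x => (f x).count p)).sum := by
  induction l with
  | nil => rfl
  | cons a l ih => simp [List.flatMap_cons, List.count_append, ih]

-- the flattened list of all bump targets B performs
def events (ice : List (List Int)) (n m : Nat) : List (Int × Int) :=
  (List.range n).flatMap (fun i => (List.range m).flatMap (fun j =>
    if gget ice i j = 0 then
      [((i : Int) - 1, (j : Int)), ((i : Int) + 1, (j : Int)),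
       ((i : Int), (j : Int) - 1), ((i : Int), (j : Int) + 1)]
    else []))

lemma sum_map_range_pick (M t v : Nat) :
    ((List.range M).map (fun k => if k = t then v else 0)).sum = if t < M then v else 0 := by
  induction M with
  | zero => simp
  | succ M ih =>
    rw [List.range_succ, List.map_append, List.sum_append]
    rcases Nat.lt_trichotomy t M with h | h | h
    · simp [ih, h, Nat.lt_succ_of_lt h, Nat.ne_of_gt h]
    · subst h; simp [ih]
    · have h1 : ¬ t < M := by omega
      have h2 : ¬ t < M + 1 := by omega
      simp [ih, h1, h2, Nat.ne_of_lt h]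

-- Nat indicator: cell (i, j) is water
def wat (ice : List (List Int)) (i j : Nat) : Nat := if gget ice i j = 0 then 1 else 0

-- Nat version of nbr0
def natNbr (ice : List (List Int)) (n m : Nat) (a b : Int) : Nat :=
  if 0 ≤ a ∧ a < (n : Int) ∧ 0 ≤ b ∧ b < (m : Int) ∧ gget ice a.toNat b.toNat = 0 then 1 else 0

lemma nbr0_natNbr (ice : List (List Int)) (n m : Nat) (a b : Int) :
    nbr0 ice n m a b = (natNbr ice n m a b : Int) := by
  unfold nbr0 natNbr
  split <;> simp

lemma sum_map_add {α : Type} (l : List α) (f g : α → Nat) :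
    (l.map (fun x => f x + g x)).sum = (l.map f).sum + (l.map g).sum := by
  induction l with
  | nil => rfl
  | cons a l ih => simp [ih]; ring

lemma sum_sum_pick (n m a b : Nat) (w : Nat → Nat → Nat) :
    ((List.range n).map (fun i =>
      ((List.range m).map (fun j => if i = a ∧ j = b then w i j else 0)).sum)).sum
    = if a < n ∧ b < m then w a b else 0 := by
  have h1 : ∀ i, ((List.range m).map (fun j => if i = a ∧ j = b then w i j else 0)).sum
      = if i = a then (if b < m then w a b else 0) else 0 := by
    intro i
    rw [show (fun (j : Nat) => if i = a ∧ j = b then w i j else 0)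
          = (fun j => if j = b then (if i = a then w a b else 0) else 0) from
        funext fun j => by
          by_cases hj : j = b <;> by_cases hi : i = a <;> simp [hj, hi]]
    rw [sum_map_range_pick]
    by_cases hb : b < m <;> by_cases hi : i = a <;> simp [hb, hi]
  simp only [h1]
  rw [sum_map_range_pick]
  by_cases ha : a < n <;> by_cases hb : b < m <;> simp [ha, hb]

lemma events_count (ice : List (List Int)) (n m : Nat) (x y : Nat) (hx : x < n) (hy : y < m) :
    ((events ice n m).count ((x : Int), (y : Int)) : Int) = waterCount ice n m x y := by
  -- count of the four bump targets of one cell, as a sum of indicators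
  have hcell : ∀ i j : Nat,
      (List.count ((x : Int), (y : Int)) (if gget ice i j = 0 then
        [((i : Int) - 1, (j : Int)), ((i : Int) + 1, (j : Int)),
         ((i : Int), (j : Int) - 1), ((i : Int), (j : Int) + 1)] else []))
      = (if (i : Int) - 1 = (x : Int) ∧ (j : Int) = (y : Int) then wat ice i j else 0)
      + (if (i : Int) + 1 = (x : Int) ∧ (j : Int) = (y : Int) then wat ice i j else 0)
      + (if (i : Int) = (x : Int) ∧ (j : Int) - 1 = (y : Int) then wat ice i j else 0)
      + (if (i : Int) = (x : Int) ∧ (j : Int) + 1 = (y : Int) then wat ice i j else 0) := by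
    intro i j
    by_cases hw : gget ice i j = 0
    · rw [if_pos hw]
      simp only [List.count_cons, List.count_nil, beq_iff_eq, Prod.mk.injEq, wat, hw, if_pos]
      ring
    · rw [if_neg hw]
      simp [wat, hw]
  -- each direction's total over the whole grid
  have S1 : ((List.range n).map (fun (i : Nat) => ((List.range m).map (fun (j : Nat) =>
        if (i : Int) - 1 = (x : Int) ∧ (j : Int) = (y : Int) then wat ice i j else 0)).sum)).sum
      = natNbr ice n m ((x : Int) + 1) ((y : Int) + 0) := by
    rw [show (fun (i : Nat) => ((List.range m).map (fun (j : Nat) =>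
          if (i : Int) - 1 = (x : Int) ∧ (j : Int) = (y : Int) then wat ice i j else 0)).sum)
        = (fun i => ((List.range m).map (fun (j : Nat) =>
          if i = x + 1 ∧ j = y then wat ice i j else 0)).sum) from
      funext fun i => by
        rw [show (fun (j : Nat) => if (i : Int) - 1 = (x : Int) ∧ (j : Int) = (y : Int) then wat ice i j else 0)
            = (fun j => if i = x + 1 ∧ j = y then wat ice i j else 0) from
          funext fun j => if_congr (by omega) rfl rfl]]
    rw [sum_sum_pick]
    unfold natNbr wat
    rw [show ((x : Int) + 1).toNat = x + 1 from by omega,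
        show ((y : Int) + 0).toNat = y from by omega]
    by_cases hg : gget ice (x + 1) y = 0
    · by_cases h1 : x + 1 < n
      · rw [if_pos (show x + 1 < n ∧ y < m from ⟨h1, hy⟩), if_pos hg,
            if_pos (show (0:Int) ≤ (x:Int) + 1 ∧ (x:Int) + 1 < (n:Int) ∧ (0:Int) ≤ (y:Int) + 0 ∧ (y:Int) + 0 < (m:Int) ∧ gget ice (x + 1) y = 0 from ⟨by omega, by omega, by omega, by omega, hg⟩)]
      · rw [if_neg (show ¬(x + 1 < n ∧ y < m) from fun hc => h1 hc.1),
            if_neg (show ¬((0:Int) ≤ (x:Int) + 1 ∧ (x:Int) + 1 < (n:Int) ∧ (0:Int) ≤ (y:Int) + 0 ∧ (y:Int) + 0 < (m:Int) ∧ gget ice (x + 1) y = 0) from fun hc => h1 (by have := hc.2.1; omega))]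
    · rw [if_neg (show ¬((0:Int) ≤ (x:Int) + 1 ∧ (x:Int) + 1 < (n:Int) ∧ (0:Int) ≤ (y:Int) + 0 ∧ (y:Int) + 0 < (m:Int) ∧ gget ice (x + 1) y = 0) from fun hc => hg hc.2.2.2.2)]
      by_cases h1 : x + 1 < n
      · rw [if_pos (show x + 1 < n ∧ y < m from ⟨h1, hy⟩), if_neg hg]
      · rw [if_neg (show ¬(x + 1 < n ∧ y < m) from fun hc => h1 hc.1)]
  have S2 : ((List.range n).map (fun (i : Nat) => ((List.range m).map (fun (j : Nat) =>
        if (i : Int) + 1 = (x : Int) ∧ (j : Int) = (y : Int) then wat ice i j else 0)).sum)).sum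
      = natNbr ice n m ((x : Int) + -1) ((y : Int) + 0) := by
    rcases x with _ | x'
    · rw [show (fun (i : Nat) => ((List.range m).map (fun (j : Nat) =>
            if (i : Int) + 1 = ((0 : Nat) : Int) ∧ (j : Int) = (y : Int) then wat ice i j else 0)).sum)
          = (fun _ => (0 : Nat)) from
        funext fun i => by
          rw [show (fun (j : Nat) => if (i : Int) + 1 = ((0 : Nat) : Int) ∧ (j : Int) = (y : Int) then wat ice i j else 0)
              = (fun _ => (0 : Nat)) from funext fun j => if_neg (by omega)]
          simp]
      simp [natNbr]
    · rw [show (fun (i : Nat) => ((List.range m).map (fun (j : Nat) =>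
            if (i : Int) + 1 = ((x' + 1 : Nat) : Int) ∧ (j : Int) = (y : Int) then wat ice i j else 0)).sum)
          = (fun i => ((List.range m).map (fun (j : Nat) =>
            if i = x' ∧ j = y then wat ice i j else 0)).sum) from
        funext fun i => by
          rw [show (fun (j : Nat) => if (i : Int) + 1 = ((x' + 1 : Nat) : Int) ∧ (j : Int) = (y : Int) then wat ice i j else 0)
              = (fun j => if i = x' ∧ j = y then wat ice i j else 0) from
            funext fun j => if_congr (by omega) rfl rfl]]
      rw [sum_sum_pick]
      unfold natNbr wat
      rw [show (((x' + 1 : Nat) : Int) + -1).toNat = x' from by omega,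
          show ((y : Int) + 0).toNat = y from by omega]
      have h1 : x' < n := by omega
      by_cases hg : gget ice x' y = 0
      · rw [if_pos (show x' < n ∧ y < m from ⟨h1, hy⟩), if_pos hg,
            if_pos (show (0:Int) ≤ ((x' + 1 : Nat) : Int) + -1 ∧ ((x' + 1 : Nat) : Int) + -1 < (n:Int) ∧ (0:Int) ≤ (y:Int) + 0 ∧ (y:Int) + 0 < (m:Int) ∧ gget ice x' y = 0 from ⟨by omega, by omega, by omega, by omega, hg⟩)]
      · rw [if_pos (show x' < n ∧ y < m from ⟨h1, hy⟩), if_neg hg,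
            if_neg (show ¬((0:Int) ≤ ((x' + 1 : Nat) : Int) + -1 ∧ ((x' + 1 : Nat) : Int) + -1 < (n:Int) ∧ (0:Int) ≤ (y:Int) + 0 ∧ (y:Int) + 0 < (m:Int) ∧ gget ice x' y = 0) from fun hc => hg hc.2.2.2.2)]
  have S3 : ((List.range n).map (fun (i : Nat) => ((List.range m).map (fun (j : Nat) =>
        if (i : Int) = (x : Int) ∧ (j : Int) - 1 = (y : Int) then wat ice i j else 0)).sum)).sum
      = natNbr ice n m ((x : Int) + 0) ((y : Int) + 1) := by
    rw [show (fun (i : Nat) => ((List.range m).map (fun (j : Nat) =>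
          if (i : Int) = (x : Int) ∧ (j : Int) - 1 = (y : Int) then wat ice i j else 0)).sum)
        = (fun i => ((List.range m).map (fun (j : Nat) =>
          if i = x ∧ j = y + 1 then wat ice i j else 0)).sum) from
      funext fun i => by
        rw [show (fun (j : Nat) => if (i : Int) = (x : Int) ∧ (j : Int) - 1 = (y : Int) then wat ice i j else 0)
            = (fun j => if i = x ∧ j = y + 1 then wat ice i j else 0) from
          funext fun j => if_congr (by omega) rfl rfl]]
    rw [sum_sum_pick]
    unfold natNbr wat
    rw [show ((x : Int) + 0).toNat = x from by omega,
        show ((y : Int) + 1).toNat = y + 1 from by omega]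
    by_cases hg : gget ice x (y + 1) = 0
    · by_cases h1 : y + 1 < m
      · rw [if_pos (show x < n ∧ y + 1 < m from ⟨hx, h1⟩), if_pos hg,
            if_pos (show (0:Int) ≤ (x:Int) + 0 ∧ (x:Int) + 0 < (n:Int) ∧ (0:Int) ≤ (y:Int) + 1 ∧ (y:Int) + 1 < (m:Int) ∧ gget ice x (y + 1) = 0 from ⟨by omega, by omega, by omega, by omega, hg⟩)]
      · rw [if_neg (show ¬(x < n ∧ y + 1 < m) from fun hc => h1 hc.2),
            if_neg (show ¬((0:Int) ≤ (x:Int) + 0 ∧ (x:Int) + 0 < (n:Int) ∧ (0:Int) ≤ (y:Int) + 1 ∧ (y:Int) + 1 < (m:Int) ∧ gget ice x (y + 1) = 0) from fun hc => h1 (by have := hc.2.2.2.1; omega))]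
    · rw [if_neg (show ¬((0:Int) ≤ (x:Int) + 0 ∧ (x:Int) + 0 < (n:Int) ∧ (0:Int) ≤ (y:Int) + 1 ∧ (y:Int) + 1 < (m:Int) ∧ gget ice x (y + 1) = 0) from fun hc => hg hc.2.2.2.2)]
      by_cases h1 : y + 1 < m
      · rw [if_pos (show x < n ∧ y + 1 < m from ⟨hx, h1⟩), if_neg hg]
      · rw [if_neg (show ¬(x < n ∧ y + 1 < m) from fun hc => h1 hc.2)]
  have S4 : ((List.range n).map (fun (i : Nat) => ((List.range m).map (fun (j : Nat) =>
        if (i : Int) = (x : Int) ∧ (j : Int) + 1 = (y : Int) then wat ice i j else 0)).sum)).sum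
      = natNbr ice n m ((x : Int) + 0) ((y : Int) + -1) := by
    rcases y with _ | y'
    · rw [show (fun (i : Nat) => ((List.range m).map (fun (j : Nat) =>
            if (i : Int) = (x : Int) ∧ (j : Int) + 1 = ((0 : Nat) : Int) then wat ice i j else 0)).sum)
          = (fun _ => (0 : Nat)) from
        funext fun i => by
          rw [show (fun (j : Nat) => if (i : Int) = (x : Int) ∧ (j : Int) + 1 = ((0 : Nat) : Int) then wat ice i j else 0)
              = (fun _ => (0 : Nat)) from funext fun j => if_neg (by omega)]
          simp]
      simp [natNbr]
    · rw [show (fun (i : Nat) => ((List.range m).map (fun (j : Nat) =>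
            if (i : Int) = (x : Int) ∧ (j : Int) + 1 = ((y' + 1 : Nat) : Int) then wat ice i j else 0)).sum)
          = (fun i => ((List.range m).map (fun (j : Nat) =>
            if i = x ∧ j = y' then wat ice i j else 0)).sum) from
        funext fun i => by
          rw [show (fun (j : Nat) => if (i : Int) = (x : Int) ∧ (j : Int) + 1 = ((y' + 1 : Nat) : Int) then wat ice i j else 0)
              = (fun j => if i = x ∧ j = y' then wat ice i j else 0) from
            funext fun j => if_congr (by omega) rfl rfl]]
      rw [sum_sum_pick]
      unfold natNbr wat
      rw [show ((x : Int) + 0).toNat = x from by omega,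
          show (((y' + 1 : Nat) : Int) + -1).toNat = y' from by omega]
      have h1 : y' < m := by omega
      by_cases hg : gget ice x y' = 0
      · rw [if_pos (show x < n ∧ y' < m from ⟨hx, h1⟩), if_pos hg,
            if_pos (show (0:Int) ≤ (x:Int) + 0 ∧ (x:Int) + 0 < (n:Int) ∧ (0:Int) ≤ ((y' + 1 : Nat) : Int) + -1 ∧ ((y' + 1 : Nat) : Int) + -1 < (m:Int) ∧ gget ice x y' = 0 from ⟨by omega, by omega, by omega, by omega, hg⟩)]
      · rw [if_pos (show x < n ∧ y' < m from ⟨hx, h1⟩), if_neg hg,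
            if_neg (show ¬((0:Int) ≤ (x:Int) + 0 ∧ (x:Int) + 0 < (n:Int) ∧ (0:Int) ≤ ((y' + 1 : Nat) : Int) + -1 ∧ ((y' + 1 : Nat) : Int) + -1 < (m:Int) ∧ gget ice x y' = 0) from fun hc => hg hc.2.2.2.2)]
  -- assemble
  have hN : (events ice n m).count ((x : Int), (y : Int))
      = natNbr ice n m ((x : Int) + 1) ((y : Int) + 0) + natNbr ice n m ((x : Int) + -1) ((y : Int) + 0)
      + natNbr ice n m ((x : Int) + 0) ((y : Int) + 1) + natNbr ice n m ((x : Int) + 0) ((y : Int) + -1) := by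
    unfold events
    rw [count_flatMap]
    rw [show (fun (i : Nat) => ((List.range m).flatMap (fun j => if gget ice i j = 0 then
          [((i : Int) - 1, (j : Int)), ((i : Int) + 1, (j : Int)),
           ((i : Int), (j : Int) - 1), ((i : Int), (j : Int) + 1)] else [])).count ((x : Int), (y : Int)))
        = (fun (i : Nat) => ((List.range m).map (fun (j : Nat) =>
            (if (i : Int) - 1 = (x : Int) ∧ (j : Int) = (y : Int) then wat ice i j else 0)
          + (if (i : Int) + 1 = (x : Int) ∧ (j : Int) = (y : Int) then wat ice i j else 0)
          + (if (i : Int) = (x : Int) ∧ (j : Int) - 1 = (y : Int) then wat ice i j else 0)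
          + (if (i : Int) = (x : Int) ∧ (j : Int) + 1 = (y : Int) then wat ice i j else 0))).sum) from
      funext fun i => by
        rw [count_flatMap]
        exact congrArg List.sum (congrArg (fun f => List.map f (List.range m)) (funext fun j => hcell i j))]
    simp only [sum_map_add]
    rw [S1, S2, S3, S4]
  rw [hN, waterCount_eq]
  simp only [nbr0_natNbr]
  push_cast
  ring

-- ===== VERDICT (by name: the statement is the Claim_ definition above) =====
theorem melt_iceberg_spec : Claim_equal_melt_iceberg := by
  intro ice _ _
  unfold Spec_melt_iceberg
  rw [A_char]
  simp only [melt_iceberg_alt]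
  have hmelt : (List.range ice.length).foldl (fun g i =>
      (List.range (ice.headD []).length).foldl (fun g j =>
        if gget ice i j = 0 then
          [((i : Int) - 1, (j : Int)), ((i : Int) + 1, (j : Int)),
           ((i : Int), (j : Int) - 1), ((i : Int), (j : Int) + 1)].foldl
            (pvBump ice.length (ice.headD []).length) g
        else g) g)
      (List.replicate ice.length (List.replicate (ice.headD []).length (0 : Int)))
      = (events ice ice.length (ice.headD []).length).foldl
          (pvBump ice.length (ice.headD []).length)
          (List.replicate ice.length (List.replicate (ice.headD []).length (0 : Int))) := by
    unfold events
    rw [foldl_flatMap]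
    rw [show (fun (g : List (List Int)) (i : Nat) =>
          ((List.range (ice.headD []).length).flatMap (fun j => if gget ice i j = 0 then
            [((i : Int) - 1, (j : Int)), ((i : Int) + 1, (j : Int)),
             ((i : Int), (j : Int) - 1), ((i : Int), (j : Int) + 1)] else [])).foldl
            (pvBump ice.length (ice.headD []).length) g)
        = (fun (g : List (List Int)) (i : Nat) =>
          (List.range (ice.headD []).length).foldl (fun g j =>
            if gget ice i j = 0 then
              [((i : Int) - 1, (j : Int)), ((i : Int) + 1, (j : Int)),
               ((i : Int), (j : Int) - 1), ((i : Int), (j : Int) + 1)].foldl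
                (pvBump ice.length (ice.headD []).length) g
            else g) g) from
      funext fun g => funext fun i => by
        rw [foldl_flatMap]
        congr 1
        funext g j
        by_cases hw : gget ice i j = 0 <;> simp [hw]]
  rw [hmelt]
  apply List.map_congr_left
  intro i hi
  apply List.map_congr_left
  intro j hj
  rw [List.mem_range] at hi hj
  have hzero : gget (List.replicate ice.length (List.replicate (ice.headD []).length (0 : Int))) i j = 0 := by
    have hj' : j < (ice.head?.getD []).length := by
      rw [← List.headD_eq_head?_getD]; exact hj
    simp [gget, List.getD_eq_getElem?_getD, hi, hj']
  have hm : gget ((events ice ice.length (ice.headD []).length).foldl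
      (pvBump ice.length (ice.headD []).length)
      (List.replicate ice.length (List.replicate (ice.headD []).length (0 : Int)))) i j
      = waterCount ice ice.length (ice.headD []).length i j := by
    rw [foldl_bump_count ice.length (ice.headD []).length
        (events ice ice.length (ice.headD []).length) _ i j
        (shaped_replicate ice.length (ice.headD []).length) hi hj,
      hzero, zero_add,
      events_count ice ice.length (ice.headD []).length i j hi hj]
  rw [hm]
  unfold cellA
  rfl
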